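-- pv_equiv track=rewrite | github.com/Yangjunyeong/dailywork | d05_4.py | sum_of_repeat_number
-- ===== SOURCE A (Python) =====
-- def sum_of_repeat_number(num):
--     not_repeat = {}
--     lst=[]
--     for i in num:
--         if i in not_repeat:
--             not_repeat[i] += 1
--         else:
--             not_repeat[i] = 1
--
--     for i in not_repeat:
--         if not_repeat[i] == 1:
--             lst.append(i)
--
--     return sum(lst)
-- ===== SOURCE B (Python) =====
-- def sum_of_repeat_number(num):
--     total = 0
--     cur = 0
--     run = 0
--     for x in sorted(num):
--         if run != 0 and x == cur:
--             run += 1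
--         else:
--             if run == 1:
--                 total += cur
--             cur = x
--             run = 1
--     if run == 1:
--         total += cur
--     return total
-- ===== Notes on version B (the rewrite author's own statement) =====
-- stated objective: alternative
-- what changed: Replaces the frequency dictionary plus key-iteration pass with sort-then-single-scan: group equal consecutive elements of the sorted list and add a value to the sum when its run length is exactly 1.
import Mathlib
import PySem

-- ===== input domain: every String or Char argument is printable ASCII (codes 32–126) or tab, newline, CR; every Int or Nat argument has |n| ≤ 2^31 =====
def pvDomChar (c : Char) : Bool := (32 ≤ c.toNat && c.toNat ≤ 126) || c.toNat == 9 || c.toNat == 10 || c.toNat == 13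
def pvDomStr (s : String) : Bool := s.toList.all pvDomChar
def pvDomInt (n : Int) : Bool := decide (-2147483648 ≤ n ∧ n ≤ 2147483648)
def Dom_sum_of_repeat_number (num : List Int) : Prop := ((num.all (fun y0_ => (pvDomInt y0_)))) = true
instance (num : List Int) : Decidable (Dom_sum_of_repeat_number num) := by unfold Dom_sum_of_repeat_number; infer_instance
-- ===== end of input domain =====

-- B replaces A's frequency dictionary + key pass by sort-then-run-length scan (alternative algorithm, same result).

-- ===== PORT A =====
def sum_of_repeat_number (num : List Int) : Int :=
  let not_repeat := num.foldl
    (fun d i => if d.contains i then d.insert i (d.getD i 0 + 1) else d.insert i 1)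
    (PySem.Dict.empty : PySem.Dict Int Int)
  let lst := not_repeat.keys.foldl
    (fun lst i => if not_repeat.getD i 0 == 1 then lst ++ [i] else lst) []
  lst.sum

-- ===== PORT B =====
-- the for-loop of Source B over the sorted list, state (total, cur, run), plus the trailing flush
def pvAltLoop : List Int → Int → Int → Int → Int
  | [], total, cur, run => if run == 1 then total + cur else total
  | x :: rest, total, cur, run =>
    if run != 0 && x == cur then pvAltLoop rest total cur (run + 1)
    else pvAltLoop rest (if run == 1 then total + cur else total) x 1

def sum_of_repeat_number_alt (num : List Int) : Int :=
  pvAltLoop (PySem.List.sorted num (fun x => x) false) 0 0 0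

-- ===== PRECONDITION & SPEC =====
def Spec_sum_of_repeat_number (num : List Int) (out : Int) : Prop := out = sum_of_repeat_number_alt num
instance (num : List Int) (out : Int) : Decidable (Spec_sum_of_repeat_number num out) := by unfold Spec_sum_of_repeat_number; infer_instance

-- ===== CLAIM (what is proved, stated in full; the proofs are below) =====
def Claim_equal_sum_of_repeat_number : Prop := ∀ (num : List Int), Dom_sum_of_repeat_number num → Spec_sum_of_repeat_number num (sum_of_repeat_number num)

-- ===== LEMMAS AND PROOFS =====

-- sum of the elements of l whose multiplicity in l is exactly 1 (each such element occurs once)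
def onceSum (l : List Int) : Int := (l.filter (fun x => (l.count x : Int) == 1)).sum

-- A's counting fold is Counter(num)
lemma foldA_eq_counter (num : List Int) :
    num.foldl (fun d i => if d.contains i then d.insert i (d.getD i 0 + 1) else d.insert i 1)
      (PySem.Dict.empty : PySem.Dict Int Int) = PySem.Dict.counter num := by
  have hstep : (fun (d : PySem.Dict Int Int) i =>
      if d.contains i then d.insert i (d.getD i 0 + 1) else d.insert i 1)
      = fun d i => d.insert i (d.getD i 0 + 1) := by
    funext d i
    by_cases h : d.contains i
    · simp [h]
    · simp only [Bool.not_eq_true] at h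
      rw [if_neg (by simp [h]), PySem.Dict.getD_of_not_contains (h := h)]
      norm_num
  rw [hstep, PySem.Dict.foldl_insert_getD_add_one_eq_counter]

lemma A_eq_onceSum (num : List Int) : sum_of_repeat_number num = onceSum num := by
  unfold sum_of_repeat_number onceSum
  simp only [foldA_eq_counter, PySem.List.foldl_append_if_eq_filter, List.nil_append,
    PySem.Dict.keys_counter, PySem.Dict.getD_counter]
  refine (List.perm_iff_count.mpr fun v => ?_).sum_eq
  by_cases hv : ((num.count v : Int) == 1) = true
  · have h1 : num.count v = 1 := by
      have := beq_iff_eq.mp hv; omega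
    have hm : v ∈ PySem.Set.ofList num := by
      simp only [PySem.Set.mem_ofList]
      exact List.count_pos_iff.mp (by omega)
    have hcf : ∀ l : List Int,
        (l.filter (fun x => ((num.count x : Int) == 1))).count v = l.count v :=
      fun l => List.count_filter hv
    rw [hcf, hcf, h1, List.count_eq_one_of_mem (PySem.Set.nodup_ofList num) hm]
  · have hz : ∀ l : List Int, (l.filter (fun x => ((num.count x : Int) == 1))).count v = 0 := by
      intro l
      refine List.count_eq_zero.mpr fun hm => ?_
      exact hv (List.mem_filter.mp hm).2
    rw [hz, hz]

-- filtering by "count 1 in x :: rest" on rest = drop the x's, then filter by "count 1" there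
lemma filter_shift (x : Int) (rest : List Int) :
    rest.filter (fun y => (((x :: rest).count y : Int) == 1)) =
    (rest.filter (fun y => y != x)).filter
      (fun y => (((rest.filter (fun z => z != x)).count y : Int) == 1)) := by
  rw [List.filter_filter]
  apply List.filter_congr
  intro y hy
  by_cases hyx : y = x
  · subst hyx
    have hpos : 1 ≤ rest.count y := List.count_pos_iff.mpr hy
    rw [List.count_cons_self]
    have hf : (((rest.count y + 1 : Nat) : Int) == 1) = false := by
      rw [beq_eq_false_iff_ne]
      intro hc; omega
    rw [hf, bne_self_eq_false]
    simp
  · have hxy : ¬x = y := fun h => hyx h.symm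
    have h1 : (x :: rest).count y = rest.count y := by
      simp [hxy]
    have h2 : (rest.filter (fun z => z != x)).count y = rest.count y := by
      rw [List.count_filter]; simp [hyx]
    rw [h1, h2]
    simp [hyx]

-- onceSum of a list peels off all copies of its head
lemma onceSum_cons (x : Int) (rest : List Int) :
    onceSum (x :: rest) =
      (if x ∈ rest then 0 else x) + onceSum (rest.filter (fun y => y != x)) := by
  unfold onceSum
  rw [List.filter_cons, filter_shift]
  by_cases hx : x ∈ rest
  · have hpos : 1 ≤ rest.count x := List.count_pos_iff.mpr hx
    have hpx : (((x :: rest).count x : Int) == 1) = false := by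
      rw [List.count_cons_self]
      simp only [beq_eq_false_iff_ne, ne_eq]
      omega
    have hne : rest.count x ≠ 0 := by omega
    simp [hx, hne]
  · have h0 : rest.count x = 0 := List.count_eq_zero.mpr hx
    have hpx : (((x :: rest).count x : Int) == 1) = true := by
      rw [List.count_cons_self, h0]
      norm_num
    simp [hx, h0]

-- main loop invariant: a run of `cur` of length `run ≥ 1` is pending, everything left is ≥ cur
lemma pvAltLoop_invariant (s : List Int) : ∀ (total cur run : Int),
    s.Pairwise (· ≤ ·) → (∀ y ∈ s, cur ≤ y) → 1 ≤ run →
    pvAltLoop s total cur run =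
      total + (if run = 1 ∧ cur ∉ s then cur else 0) + onceSum (s.filter (fun y => y != cur)) := by
  induction s with
  | nil =>
    intro total cur run _ _ hrun
    by_cases h : run = 1 <;> simp [pvAltLoop, h, onceSum]
  | cons x rest ih =>
    intro total cur run hp hge hrun
    have hp' : rest.Pairwise (· ≤ ·) := hp.tail
    have hx_le : ∀ y ∈ rest, x ≤ y := fun y hy => (List.pairwise_cons.mp hp).1 y hy
    by_cases hxc : x = cur
    · subst hxc
      have hguard : (run != 0 && x == x) = true := by simp; omega
      simp only [pvAltLoop]
      rw [if_pos hguard, ih total x (run + 1) hp' hx_le (by omega)]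
      have h1 : ¬(run + 1 = 1 ∧ x ∉ rest) := fun h => absurd h.1 (by omega)
      have h2 : ¬(run = 1 ∧ x ∉ x :: rest) := fun h => h.2 List.mem_cons_self
      rw [if_neg h1, if_neg h2]
      congr 1
      simp
    · have hlt : cur < x := lt_of_le_of_ne (hge x List.mem_cons_self) (fun h => hxc h.symm)
      have hguard : ¬((run != 0 && x == cur) = true) := by simp [hxc]
      simp only [pvAltLoop]
      rw [if_neg hguard, ih (if run == 1 then total + cur else total) x 1 hp' hx_le (le_refl 1)]
      have hnm : cur ∉ (x :: rest) := by
        intro hm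
        rcases List.mem_cons.mp hm with h | h
        · exact hxc h.symm
        · exact absurd (hx_le cur h) (by omega)
      have hfilt : (x :: rest).filter (fun y => y != cur) = x :: rest := by
        apply List.filter_eq_self.mpr
        intro y hy
        rcases List.mem_cons.mp hy with h | h
        · subst h; simp [hxc]
        · have := hx_le y h; simp; omega
      rw [hfilt, onceSum_cons]
      have e1 : (if (1 : Int) = 1 ∧ x ∉ rest then x else 0) = (if x ∈ rest then 0 else x) := by
        by_cases h : x ∈ rest <;> simp [h]
      have e2 : (if run == 1 then total + cur else total)
          = total + (if run = 1 ∧ cur ∉ (x :: rest) then cur else 0) := by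
        by_cases hr : run = 1 <;> simp [hr, hnm]
      rw [e1, e2]
      ring

lemma pvAltLoop_start (s : List Int) (hp : s.Pairwise (· ≤ ·)) :
    pvAltLoop s 0 0 0 = onceSum s := by
  cases s with
  | nil => simp [pvAltLoop, onceSum]
  | cons x rest =>
    have hx_le : ∀ y ∈ rest, x ≤ y := fun y hy => (List.pairwise_cons.mp hp).1 y hy
    simp only [pvAltLoop]
    rw [if_neg (by simp)]
    rw [show (if (0 : Int) == 1 then (0 : Int) + 0 else 0) = 0 from rfl]
    rw [pvAltLoop_invariant rest 0 x 1 hp.tail hx_le (le_refl 1), onceSum_cons]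
    by_cases hxr : x ∈ rest <;> simp [hxr]

lemma onceSum_perm {l l' : List Int} (h : l.Perm l') : onceSum l = onceSum l' := by
  unfold onceSum
  have hc : (fun x => ((l.count x : Int) == 1)) = (fun x => ((l'.count x : Int) == 1)) := by
    funext x; rw [h.count_eq]
  rw [hc]
  exact (h.filter _).sum_eq

-- ===== VERDICT (by name: the statement is the Claim_ definition above) =====
theorem sum_of_repeat_number_spec : Claim_equal_sum_of_repeat_number := by
  intro num _
  unfold Spec_sum_of_repeat_number sum_of_repeat_number_alt
  rw [A_eq_onceSum, pvAltLoop_start _ (PySem.List.sorted_pairwise num (fun x => x)),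
    onceSum_perm (PySem.List.sorted_perm num (fun x => x) false)]
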